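-- pv_equiv track=rewrite | github.com/rknightion/meraki-dashboard-exporter | src/meraki_dashboard_exporter/collectors/clients.py | _sanitize_application_name
-- ===== SOURCE A (Python) =====
-- def _sanitize_application_name(app_name: str | None) -> str:
--     """Sanitize application name for use as a metric label.
--
--     Converts application names like "Google HTTPS" to a more
--     metric-friendly format like "google_https".
--
--     Parameters
--     ----------
--     app_name : str | None
--         Application name from Meraki API.
--
--     Returns
--     -------
--     str
--         Sanitized application name suitable for metric labels.
--
--     """
--     if not app_name:
--         return "unknown"
--
--     # Convert to lowercase
--     sanitized = app_name.lower()
--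
--     # Replace common patterns
--     sanitized = sanitized.replace(" - ", "_")
--     sanitized = sanitized.replace(" ", "_")
--     sanitized = sanitized.replace("-", "_")
--     sanitized = sanitized.replace("(", "_")
--     sanitized = sanitized.replace(")", "_")
--     sanitized = sanitized.replace("/", "_")
--     sanitized = sanitized.replace("\\", "_")
--     sanitized = sanitized.replace(".", "_")
--     sanitized = sanitized.replace(",", "_")
--     sanitized = sanitized.replace(":", "_")
--     sanitized = sanitized.replace(";", "_")
--     sanitized = sanitized.replace("'", "")
--     sanitized = sanitized.replace('"', "")
--
--     # Remove any remaining non-alphanumeric characters except underscores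
--     result = ""
--     for char in sanitized:
--         if char.isalnum() or char == "_":
--             result += char
--
--     # Clean up multiple consecutive underscores
--     while "__" in result:
--         result = result.replace("__", "_")
--
--     # Remove leading/trailing underscores
--     result = result.strip("_")
--
--     return result if result else "unknown"
-- ===== SOURCE B (Python) =====
-- _SEPS = set(" -()/\\.,:;_")
--
--
-- def _sanitize_application_name(app_name):
--     """Sanitize application name for metric labels (single-pass rewrite)."""
--     if not app_name:
--         return "unknown"
--     buf = []
--     for ch in app_name.lower():
--         if ch.isalnum():
--             buf.append(ch)
--         elif ch in _SEPS:
--             if buf and buf[-1] != "_":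
--                 buf.append("_")
--     result = "".join(buf).strip("_")
--     return result if result else "unknown"
-- ===== Notes on version B (the rewrite author's own statement) =====
-- stated objective: simpler
-- what changed: Replaces A's chain of twelve whole-string replace passes, a keep-filter pass and a while-loop that repeatedly collapses doubled underscores with a single stateful pass over the lowered string that appends alphanumeric characters and at most one separator mark between runs.
import Mathlib
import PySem

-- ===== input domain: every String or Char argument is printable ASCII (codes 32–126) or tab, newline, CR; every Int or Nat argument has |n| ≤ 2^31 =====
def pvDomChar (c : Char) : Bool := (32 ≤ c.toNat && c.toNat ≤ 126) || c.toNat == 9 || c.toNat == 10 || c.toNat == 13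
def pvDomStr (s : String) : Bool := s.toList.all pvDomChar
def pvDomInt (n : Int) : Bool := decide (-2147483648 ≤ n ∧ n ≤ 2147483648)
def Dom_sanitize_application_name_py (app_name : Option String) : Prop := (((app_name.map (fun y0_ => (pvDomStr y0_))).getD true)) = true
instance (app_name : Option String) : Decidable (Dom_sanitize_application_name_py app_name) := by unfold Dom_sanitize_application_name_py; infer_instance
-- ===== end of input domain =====

-- B replaces A's twelve whole-string replace passes + filter pass + '__'-collapsing
-- while-loop by one stateful pass over the lowered string (objective: simpler).

-- ===== PORT A =====
-- the 'while "__" in result: result = result.replace("__", "_")' loop; each iteration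
-- strictly shortens the string, so fuel = initial length is enough (fuel only makes
-- the same computation total, it never changes the value reached)
def pvCollapse : Nat → List Char → List Char
  | 0, r => r
  | Nat.succ fuel, r =>
    if PySem.Chars.isIn ['_', '_'] r then
      pvCollapse fuel (PySem.Chars.replace r ['_', '_'] ['_'])
    else r

def sanitize_application_name_py (app_name : Option String) : String :=
  match app_name with
  | none => "unknown"                                   -- if not app_name
  | some s =>
    if s.toList = [] then "unknown"                     -- if not app_name (empty string)
    else
      let sanitized := PySem.Chars.lower s.toList
      let sanitized := PySem.Chars.replace sanitized [' ', '-', ' '] ['_']   -- " - " -> "_"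
      let sanitized := PySem.Chars.replace sanitized [' '] ['_']
      let sanitized := PySem.Chars.replace sanitized ['-'] ['_']
      let sanitized := PySem.Chars.replace sanitized ['('] ['_']
      let sanitized := PySem.Chars.replace sanitized [')'] ['_']
      let sanitized := PySem.Chars.replace sanitized ['/'] ['_']
      let sanitized := PySem.Chars.replace sanitized ['\\'] ['_']
      let sanitized := PySem.Chars.replace sanitized ['.'] ['_']
      let sanitized := PySem.Chars.replace sanitized [','] ['_']
      let sanitized := PySem.Chars.replace sanitized [':'] ['_']
      let sanitized := PySem.Chars.replace sanitized [';'] ['_']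
      let sanitized := PySem.Chars.replace sanitized ['\''] []
      let sanitized := PySem.Chars.replace sanitized ['"'] []
      -- result = ""; for char in sanitized: if char.isalnum() or char == "_": result += char
      let result := sanitized.foldl
        (fun acc c => if PySem.Chars.isalnum c || c == '_' then acc ++ [c] else acc) []
      let result := pvCollapse result.length result
      let result := PySem.Chars.stripChars result ['_']
      if result = [] then "unknown" else String.ofList result

-- ===== PORT B =====
def pvIsSep (c : Char) : Bool :=
  [' ', '-', '(', ')', '/', '\\', '.', ',', ':', ';', '_'].contains c

def pvStepB (buf : List Char) (c : Char) : List Char :=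
  if PySem.Chars.isalnum c then buf ++ [c]
  else if pvIsSep c then
    (if buf ≠ [] ∧ buf.getLast? ≠ some '_' then buf ++ ['_'] else buf)
  else buf

def sanitize_application_name_py_alt (app_name : Option String) : String :=
  match app_name with
  | none => "unknown"
  | some s =>
    if s.toList = [] then "unknown"
    else
      let buf := (PySem.Chars.lower s.toList).foldl pvStepB []
      let result := PySem.Chars.stripChars buf ['_']
      if result = [] then "unknown" else String.ofList result

-- ===== PRECONDITION & SPEC =====
def Spec_sanitize_application_name_py (app_name : Option String) (out : String) : Prop := out = sanitize_application_name_py_alt app_name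
instance (app_name : Option String) (out : String) : Decidable (Spec_sanitize_application_name_py app_name out) := by unfold Spec_sanitize_application_name_py; infer_instance

-- ===== CLAIM (what is proved, stated in full; the proofs are below) =====
def Claim_equal_sanitize_application_name_py : Prop := ∀ (app_name : Option String), Dom_sanitize_application_name_py app_name → Spec_sanitize_application_name_py app_name (sanitize_application_name_py app_name)

-- ===== LEMMAS AND PROOFS =====

-- structural version of PySem.Chars.replace (old nonempty, given as o :: os)
def pvRep (o : Char) (os new : List Char) : List Char → List Char
  | [] => []
  | c :: t =>
    if (o :: os).isPrefixOf (c :: t) then new ++ pvRep o os new (t.drop os.length)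
    else c :: pvRep o os new t
  termination_by l => l.length
  decreasing_by all_goals (simp [List.length_drop, List.length_cons]; try omega)

-- symbol classification shared by both pipelines (on the lowered string)
def pvToSym (c : Char) : Option Char :=
  if PySem.Chars.isalnum c then some c
  else if pvIsSep c then some '_' else none

-- canonical squeeze of consecutive underscores (right fold)
def pvSqStep (c : Char) (acc : List Char) : List Char :=
  if c = '_' ∧ acc.head? = some '_' then acc else c :: acc

def pvSq (l : List Char) : List Char := l.foldr pvSqStep []

-- drop one leading underscore
def pvDropU (v : List Char) : List Char :=
  if v.head? = some '_' then v.tail else v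

lemma pvRep_nil (o : Char) (os new : List Char) : pvRep o os new [] = [] := by
  rw [pvRep]

lemma pvRep_cons (o : Char) (os new : List Char) (c : Char) (t : List Char) :
    pvRep o os new (c :: t) =
      if (o :: os).isPrefixOf (c :: t) then new ++ pvRep o os new (t.drop os.length)
      else c :: pvRep o os new t := by
  rw [pvRep]

lemma pvGo_eq (o : Char) (os new : List Char) :
    ∀ (fuel : Nat) (l acc : List Char), l.length ≤ fuel →
      PySem.Chars.replace.go (o :: os) new fuel l acc = acc.reverse ++ pvRep o os new l := by
  intro fuel
  induction fuel with
  | zero =>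
    intro l acc h
    have hl : l = [] := by cases l with
      | nil => rfl
      | cons c t => simp at h
    subst hl
    simp [PySem.Chars.replace.go, pvRep_nil]
  | succ n ih =>
    intro l acc h
    cases l with
    | nil => simp [PySem.Chars.replace.go, pvRep_nil]
    | cons c t =>
      rw [PySem.Chars.replace.go]
      rw [pvRep_cons]
      by_cases hp : (o :: os).isPrefixOf (c :: t)
      · simp only [hp, if_true]
        rw [ih]
        · simp
        · simp only [List.length_drop, List.length_cons] at *
          omega
      · simp only [hp, if_false, Bool.false_eq_true]
        rw [ih]
        · simp
        · simp only [List.length_cons] at h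
          omega

lemma pvRep_replace (o : Char) (os new l : List Char) :
    PySem.Chars.replace l (o :: os) new = pvRep o os new l := by
  have := pvGo_eq o os new l.length l [] (le_refl _)
  simpa [PySem.Chars.replace] using this

lemma pvRep_map (a b : Char) (l : List Char) :
    pvRep a [] [b] l = l.map (fun c => if c = a then b else c) := by
  induction l with
  | nil => rw [pvRep_nil]; rfl
  | cons c t ih =>
    rw [pvRep_cons]
    by_cases h : c = a
    · subst h; simp [List.isPrefixOf, ih]
    · have h' : ¬ a = c := fun e => h e.symm
      simp [List.isPrefixOf, h, h', ih]

lemma pvRep_del (a : Char) (l : List Char) :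
    pvRep a [] [] l = l.filter (fun c => c != a) := by
  induction l with
  | nil => rw [pvRep_nil]; rfl
  | cons c t ih =>
    rw [pvRep_cons]
    by_cases h : c = a
    · subst h; simp [List.isPrefixOf, ih]
    · have h' : ¬ a = c := fun e => h e.symm
      simp [List.isPrefixOf, h, h', ih]

lemma pvSqStep_idem (a : List Char) : pvSqStep '_' (pvSqStep '_' a) = pvSqStep '_' a := by
  simp only [pvSqStep]
  split <;> simp_all

lemma pvSq_cons (c : Char) (l : List Char) : pvSq (c :: l) = pvSqStep c (pvSq l) := rfl


-- the twelve elementwise replace/delete passes plus the final keep-filter are one filterMap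
lemma pvChain_eq (x : List Char) :
    List.filter (fun c => PySem.Chars.isalnum c || c == '_')
      (List.filter (fun c => c != '"')
        (List.filter (fun c => c != '\'')
          (List.map (fun c => if c = ';' then '_' else c)
            (List.map (fun c => if c = ':' then '_' else c)
              (List.map (fun c => if c = ',' then '_' else c)
                (List.map (fun c => if c = '.' then '_' else c)
                  (List.map (fun c => if c = '\\' then '_' else c)
                    (List.map (fun c => if c = '/' then '_' else c)
                      (List.map (fun c => if c = ')' then '_' else c)
                        (List.map (fun c => if c = '(' then '_' else c)
                          (List.map (fun c => if c = '-' then '_' else c)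
                            (List.map (fun c => if c = ' ' then '_' else c) x))))))))))))
    = x.filterMap pvToSym := by
  induction x with
  | nil => rfl
  | cons c t ih =>
    by_cases h1 : c = ' '
    · subst h1
      have hs : pvToSym ' ' = some '_' := by decide
      simp [hs]
      simp at ih
      exact ih
    by_cases h2 : c = '-'
    · subst h2
      have hs : pvToSym '-' = some '_' := by decide
      simp [hs]
      simp at ih
      exact ih
    by_cases h3 : c = '('
    · subst h3
      have hs : pvToSym '(' = some '_' := by decide
      simp [hs]
      simp at ih
      exact ih
    by_cases h4 : c = ')'
    · subst h4
      have hs : pvToSym ')' = some '_' := by decide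
      simp [hs]
      simp at ih
      exact ih
    by_cases h5 : c = '/'
    · subst h5
      have hs : pvToSym '/' = some '_' := by decide
      simp [hs]
      simp at ih
      exact ih
    by_cases h6 : c = '\\'
    · subst h6
      have hs : pvToSym '\\' = some '_' := by decide
      simp [hs]
      simp at ih
      exact ih
    by_cases h7 : c = '.'
    · subst h7
      have hs : pvToSym '.' = some '_' := by decide
      simp [hs]
      simp at ih
      exact ih
    by_cases h8 : c = ','
    · subst h8
      have hs : pvToSym ',' = some '_' := by decide
      simp [hs]
      simp at ih
      exact ih
    by_cases h9 : c = ':'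
    · subst h9
      have hs : pvToSym ':' = some '_' := by decide
      simp [hs]
      simp at ih
      exact ih
    by_cases h10 : c = ';'
    · subst h10
      have hs : pvToSym ';' = some '_' := by decide
      simp [hs]
      simp at ih
      exact ih
    by_cases h11 : c = '\''
    · subst h11
      have hs : pvToSym '\'' = none := by decide
      simp [hs]
      simp at ih
      exact ih
    by_cases h12 : c = '"'
    · subst h12
      have hs : pvToSym '"' = none := by decide
      simp [hs]
      simp at ih
      exact ih
    by_cases h13 : c = '_'
    · subst h13
      have hs : pvToSym '_' = some '_' := by decide
      simp [hs]
      simp at ih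
      exact ih
    by_cases ha : PySem.Chars.isalnum c = true
    · have hs : pvToSym c = some c := by simp [pvToSym, ha]
      simp [hs, ha, h1, h2, h3, h4, h5, h6, h7, h8, h9, h10, h11, h12, h13]
      simp at ih
      exact ih
    · simp only [Bool.not_eq_true] at ha
      have hs : pvToSym c = none := by
        simp [pvToSym, pvIsSep, ha, h1, h2, h3, h4, h5, h6, h7, h8, h9, h10, h13]
      simp [hs, ha, h1, h2, h3, h4, h5, h6, h7, h8, h9, h10, h11, h12, h13]
      simp at ih
      exact ih

-- " - " -> "_" does not change the squeezed symbol string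
lemma pvSq_fm_rep3 : ∀ (n : Nat) (x : List Char), x.length ≤ n →
    pvSq ((pvRep ' ' ['-', ' '] ['_'] x).filterMap pvToSym) = pvSq (x.filterMap pvToSym) := by
  intro n
  induction n with
  | zero =>
    intro x h
    have : x = [] := by cases x with
      | nil => rfl
      | cons c t => simp at h
    subst this; rw [pvRep_nil]
  | succ n ih =>
    intro x h
    cases x with
    | nil => rw [pvRep_nil]
    | cons c t =>
      rw [pvRep_cons]
      by_cases hp : ([' ', '-', ' ']).isPrefixOf (c :: t)
      · cases t with
        | nil => simp [List.isPrefixOf] at hp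
        | cons d t2 =>
          cases t2 with
          | nil => simp [List.isPrefixOf] at hp
          | cons e r =>
            have hp' := hp
            simp [List.isPrefixOf] at hp'
            obtain ⟨hc, hd, he⟩ := hp'
            subst hc hd he
            have hr : r.length ≤ n := by simp at h; omega
            simp only [hp, if_true, List.length_cons, List.length_nil, List.drop_succ_cons, List.drop_zero, List.cons_append, List.nil_append]
            have e1 : pvToSym ' ' = some '_' := by decide
            have e2 : pvToSym '-' = some '_' := by decide
            have e3 : pvToSym '_' = some '_' := by decide
            simp only [List.filterMap_cons, e1, e2, e3]
            rw [pvSq_cons, ih r hr]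
            rw [pvSq_cons, pvSq_cons, pvSq_cons, pvSqStep_idem, pvSqStep_idem]
      · simp only [hp, Bool.false_eq_true, if_false]
        have ht : t.length ≤ n := by simp at h; omega
        simp only [List.filterMap_cons]
        cases hc : pvToSym c with
        | none => exact ih t ht
        | some d => rw [pvSq_cons, pvSq_cons, ih t ht]

-- "__" -> "_" does not change the squeezed string
lemma pvSq_rep2 : ∀ (n : Nat) (x : List Char), x.length ≤ n →
    pvSq (pvRep '_' ['_'] ['_'] x) = pvSq x := by
  intro n
  induction n with
  | zero =>
    intro x h
    have : x = [] := by cases x with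
      | nil => rfl
      | cons c t => simp at h
    subst this; rw [pvRep_nil]
  | succ n ih =>
    intro x h
    cases x with
    | nil => rw [pvRep_nil]
    | cons c t =>
      rw [pvRep_cons]
      by_cases hp : (['_', '_']).isPrefixOf (c :: t)
      · cases t with
        | nil => simp [List.isPrefixOf] at hp
        | cons d r =>
          have hp' := hp
          simp [List.isPrefixOf] at hp'
          obtain ⟨hc, hd⟩ := hp'
          subst hc hd
          have hr : r.length ≤ n := by simp at h; omega
          simp only [hp, if_true, List.length_cons, List.length_nil, List.drop_succ_cons, List.drop_zero, List.cons_append, List.nil_append]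
          rw [pvSq_cons, ih r hr, pvSq_cons, pvSq_cons, pvSqStep_idem]
      · simp only [hp, Bool.false_eq_true, if_false]
        have ht : t.length ≤ n := by simp at h; omega
        rw [pvSq_cons, pvSq_cons, ih t ht]

lemma pvRep2_len_le : ∀ (n : Nat) (x : List Char), x.length ≤ n →
    (pvRep '_' ['_'] ['_'] x).length ≤ x.length := by
  intro n
  induction n with
  | zero =>
    intro x h
    have : x = [] := by cases x with
      | nil => rfl
      | cons c t => simp at h
    subst this; rw [pvRep_nil]
  | succ n ih =>
    intro x h
    cases x with
    | nil => rw [pvRep_nil]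
    | cons c t =>
      rw [pvRep_cons]
      by_cases hp : (['_', '_']).isPrefixOf (c :: t)
      · cases t with
        | nil => simp [List.isPrefixOf] at hp
        | cons d r =>
          have hr : r.length ≤ n := by simp at h; omega
          have := ih r hr
          simp only [hp, if_true, List.length_cons, List.length_nil, List.drop_succ_cons,
            List.drop_zero, List.cons_append, List.nil_append, List.length_cons]
          simp only [List.length_nil, List.drop_zero] at this ⊢
          omega
      · simp only [hp, Bool.false_eq_true, if_false]
        have ht : t.length ≤ n := by simp at h; omega
        have := ih t ht
        simp only [List.length_cons]
        omega

lemma pvRep2_len_lt : ∀ (n : Nat) (x : List Char), x.length ≤ n →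
    ['_', '_'] <:+: x → (pvRep '_' ['_'] ['_'] x).length < x.length := by
  intro n
  induction n with
  | zero =>
    intro x h hin
    have : x = [] := by cases x with
      | nil => rfl
      | cons c t => simp at h
    subst this
    simp at hin
  | succ n ih =>
    intro x h hin
    cases x with
    | nil => simp at hin
    | cons c t =>
      rw [pvRep_cons]
      by_cases hp : (['_', '_']).isPrefixOf (c :: t)
      · cases t with
        | nil => simp [List.isPrefixOf] at hp
        | cons d r =>
          have hr : r.length ≤ n := by simp at h; omega
          have := pvRep2_len_le n r hr
          simp only [hp, if_true, List.length_cons, List.length_nil, List.drop_succ_cons,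
            List.drop_zero, List.cons_append, List.nil_append, List.length_cons]
          simp only [List.length_nil, List.drop_zero] at this ⊢
          omega
      · simp only [hp, Bool.false_eq_true, if_false]
        have htin : ['_', '_'] <:+: t := by
          rcases List.infix_cons_iff.mp hin with hpre | hinf
          · exact absurd (List.isPrefixOf_iff_prefix.mpr hpre) hp
          · exact hinf
        have ht : t.length ≤ n := by simp at h; omega
        have := ih t ht htin
        simp only [List.length_cons]
        omega

lemma pvSq_no_dd : ∀ (x : List Char), ¬ (['_', '_'] <:+: x) → pvSq x = x := by
  intro x
  induction x with
  | nil => intro _; rfl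
  | cons c t ih =>
    intro hno
    have hnt : ¬ (['_', '_'] <:+: t) := fun hh => hno (List.infix_cons_iff.mpr (Or.inr hh))
    rw [pvSq_cons, ih hnt]
    show pvSqStep c t = c :: t
    unfold pvSqStep
    split
    · next hcond =>
      exfalso
      obtain ⟨hc, hh⟩ := hcond
      subst hc
      cases t with
      | nil => simp at hh
      | cons d t2 =>
        simp at hh
        subst hh
        exact hno (List.infix_cons_iff.mpr (Or.inl ⟨t2, rfl⟩))
    · rfl

lemma pvCollapse_eq : ∀ (fuel : Nat) (r : List Char), r.length ≤ fuel →
    pvCollapse fuel r = pvSq r := by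
  intro fuel
  induction fuel with
  | zero =>
    intro r h
    have : r = [] := by cases r with
      | nil => rfl
      | cons c t => simp at h
    subst this; rfl
  | succ n ih =>
    intro r h
    show pvCollapse (n + 1) r = pvSq r
    unfold pvCollapse
    cases hin : PySem.Chars.isIn ['_', '_'] r with
    | false =>
      simp only [Bool.false_eq_true, if_false]
      exact (pvSq_no_dd r ((PySem.Chars.isIn_eq_false_iff ['_', '_'] r).mp hin)).symm
    | true =>
      simp only [if_true]
      have hinf : ['_', '_'] <:+: r := (PySem.Chars.isIn_iff_infix ['_', '_'] r).mp hin
      rw [pvRep_replace]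
      have hlt := pvRep2_len_lt r.length r (le_refl _) hinf
      rw [ih _ (by omega)]
      exact pvSq_rep2 r.length r (le_refl _)

-- B-side: the raw-char loop is the symbol loop over the filterMap
def pvStepS (buf : List Char) (d : Char) : List Char :=
  if d = '_' then (if buf ≠ [] ∧ buf.getLast? ≠ some '_' then buf ++ ['_'] else buf)
  else buf ++ [d]

lemma pvFoldB_eq_fm : ∀ (ls buf : List Char),
    ls.foldl pvStepB buf = (ls.filterMap pvToSym).foldl pvStepS buf := by
  intro ls
  induction ls with
  | nil => intro buf; rfl
  | cons c t ih =>
    intro buf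
    simp only [List.foldl_cons, List.filterMap_cons]
    by_cases ha : PySem.Chars.isalnum c = true
    · have hne : c ≠ '_' := by
        intro e; subst e; exact absurd ha (by decide)
      have h1 : pvStepB buf c = buf ++ [c] := by simp [pvStepB, ha]
      have h2 : pvToSym c = some c := by simp [pvToSym, ha]
      rw [h1, h2]
      simp only [List.foldl_cons]
      rw [ih]
      congr 1
      simp [pvStepS, hne]
    · simp only [Bool.not_eq_true] at ha
      by_cases hsp : pvIsSep c = true
      · have h1 : pvStepB buf c =
            (if buf ≠ [] ∧ buf.getLast? ≠ some '_' then buf ++ ['_'] else buf) := by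
          simp [pvStepB, ha, hsp]
        have h2 : pvToSym c = some '_' := by simp [pvToSym, ha, hsp]
        rw [h1, h2]
        simp only [List.foldl_cons]
        rw [ih]
        congr 1
      · simp only [Bool.not_eq_true] at hsp
        have h1 : pvStepB buf c = buf := by simp [pvStepB, ha, hsp]
        have h2 : pvToSym c = none := by simp [pvToSym, ha, hsp]
        rw [h1, h2, ih]

lemma pvFoldS_eq : ∀ (u buf : List Char),
    u.foldl pvStepS buf =
      buf ++ (if buf = [] ∨ buf.getLast? = some '_' then pvDropU (pvSq u) else pvSq u) := by
  intro u
  induction u with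
  | nil =>
    intro buf
    show buf = buf ++ _
    split <;> simp [pvSq, pvDropU]
  | cons d u' ih =>
    intro buf
    simp only [List.foldl_cons]
    by_cases hd : d = '_'
    · subst hd
      by_cases hb : buf = [] ∨ buf.getLast? = some '_'
      · have h1 : pvStepS buf '_' = buf := by
          unfold pvStepS
          simp only [if_pos rfl]
          rcases hb with hb | hb
          · simp [hb]
          · simp [hb]
        rw [h1, ih buf, if_pos hb, if_pos hb]
        congr 1
        rw [pvSq_cons]
        unfold pvSqStep pvDropU
        by_cases hh : (pvSq u').head? = some '_'
        · simp [hh]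
        · simp [hh]
      · have hb1 : buf ≠ [] ∧ buf.getLast? ≠ some '_' := by
          constructor
          · intro e; exact hb (Or.inl e)
          · intro e; exact hb (Or.inr e)
        have h1 : pvStepS buf '_' = buf ++ ['_'] := by
          simp [pvStepS, hb1.1, hb1.2]
        rw [h1, ih (buf ++ ['_'])]
        have hlast : (buf ++ ['_']).getLast? = some '_' := by simp
        rw [if_pos (Or.inr hlast), if_neg hb]
        rw [List.append_assoc]
        congr 1
        rw [pvSq_cons]
        unfold pvSqStep pvDropU
        by_cases hh : (pvSq u').head? = some '_'
        · simp only [hh, and_true, if_pos rfl, if_pos (And.intro rfl hh)]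
          cases hq : pvSq u' with
          | nil => simp [hq] at hh
          | cons a t =>
            simp [hq] at hh
            subst hh
            simp
        · simp only [hh]
          simp [hh]
    · have h1 : pvStepS buf d = buf ++ [d] := by
        unfold pvStepS
        rw [if_neg hd]
      rw [h1, ih (buf ++ [d])]
      have hlast : (buf ++ [d]).getLast? = some d := by simp
      have hbd : ¬ (buf ++ [d] = [] ∨ (buf ++ [d]).getLast? = some '_') := by
        rintro (he | he)
        · simp at he
        · rw [hlast] at he
          exact hd (Option.some.injEq _ _ ▸ he)
      rw [if_neg hbd, List.append_assoc]
      congr 1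
      have hsq : pvSq (d :: u') = d :: pvSq u' := by
        rw [pvSq_cons]
        unfold pvSqStep
        rw [if_neg (by intro hcc; exact hd hcc.1)]
      rw [hsq]
      have hdu : pvDropU (d :: pvSq u') = d :: pvSq u' := by
        unfold pvDropU
        rw [if_neg (by simp [hd])]
      split <;> simp [hdu]

lemma pvStrip_dropU (v : List Char) :
    PySem.Chars.stripChars (pvDropU v) ['_'] = PySem.Chars.stripChars v ['_'] := by
  unfold pvDropU
  by_cases hh : v.head? = some '_'
  · cases v with
    | nil => simp at hh
    | cons c t =>
      simp only [List.head?_cons, Option.some.injEq] at hh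
      subst hh
      have hdw : List.dropWhile (fun c => (['_'].contains c)) ('_' :: t) =
          List.dropWhile (fun c => (['_'].contains c)) t := by
        rw [List.dropWhile_cons]
        simp
      simp [PySem.Chars.stripChars, hdw]
  · rw [if_neg hh]

lemma pvA_eq (s : String) (hs : ¬ s.toList = []) :
    sanitize_application_name_py (some s) =
      (if PySem.Chars.stripChars
            (pvSq ((PySem.Chars.lower s.toList).filterMap pvToSym)) ['_'] = []
        then "unknown"
        else String.ofList
          (PySem.Chars.stripChars
            (pvSq ((PySem.Chars.lower s.toList).filterMap pvToSym)) ['_'])) := by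
  simp only [sanitize_application_name_py, if_neg hs]
  rw [pvRep_replace, pvRep_replace, pvRep_replace, pvRep_replace, pvRep_replace,
    pvRep_replace, pvRep_replace, pvRep_replace, pvRep_replace, pvRep_replace,
    pvRep_replace, pvRep_replace, pvRep_replace]
  rw [pvRep_map, pvRep_map, pvRep_map, pvRep_map, pvRep_map, pvRep_map, pvRep_map,
    pvRep_map, pvRep_map, pvRep_map, pvRep_del, pvRep_del]
  rw [PySem.List.foldl_append_if_eq_filter]
  rw [List.nil_append]
  rw [pvChain_eq]
  rw [pvCollapse_eq _ _ (le_refl _)]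
  rw [pvSq_fm_rep3 (PySem.Chars.lower s.toList).length _ (le_refl _)]

lemma pvB_eq (s : String) (hs : ¬ s.toList = []) :
    sanitize_application_name_py_alt (some s) =
      (if PySem.Chars.stripChars
            (pvSq ((PySem.Chars.lower s.toList).filterMap pvToSym)) ['_'] = []
        then "unknown"
        else String.ofList
          (PySem.Chars.stripChars
            (pvSq ((PySem.Chars.lower s.toList).filterMap pvToSym)) ['_'])) := by
  simp only [sanitize_application_name_py_alt, if_neg hs]
  rw [pvFoldB_eq_fm, pvFoldS_eq]
  rw [if_pos (Or.inl rfl), List.nil_append]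
  rw [pvStrip_dropU]

-- ===== VERDICT (by name: the statement is the Claim_ definition above) =====
theorem sanitize_application_name_py_spec : Claim_equal_sanitize_application_name_py := by
  intro app_name _
  unfold Spec_sanitize_application_name_py
  cases app_name with
  | none => rfl
  | some s =>
    by_cases hs : s.toList = []
    · simp [sanitize_application_name_py, sanitize_application_name_py_alt, hs]
    · rw [pvA_eq s hs, pvB_eq s hs]
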